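-- pv_equiv track=rewrite | github.com/Wisdom-oyemi/ai110-module4tinker-docubot-starter | docubot.py | score_document
-- ===== SOURCE A (Python) =====
-- import string
--
-- def score_document(query, text):
--     """
--     TODO (Phase 1):
--     Return a simple relevance score for how well the text matches the query.
--
--     Suggested baseline:
--     - Convert query into lowercase words
--     - Count how many appear in the text
--     - Return the count as the score
--     """
--     query_tokens = []
--     for raw in query.lower().split():
--         token = raw.strip(string.punctuation)
--         if token:
--             query_tokens.append(token)
--     if not query_tokens:
--         return 0
--
--     token_counts = {}
--     for raw in text.lower().split():
--         token = raw.strip(string.punctuation)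
--         if token:
--             token_counts[token] = token_counts.get(token, 0) + 1
--
--     score = 0
--     for token in query_tokens:
--         score += token_counts.get(token, 0)
--     return score
-- ===== SOURCE B (Python) =====
-- import string
--
-- def _tokens(s):
--     return [t for t in (raw.strip(string.punctuation) for raw in s.lower().split()) if t]
--
-- def score_document(query, text):
--     qs = sorted(_tokens(query))
--     ts = sorted(_tokens(text))
--     score = 0
--     i = j = 0
--     while i < len(qs) and j < len(ts):
--         if qs[i] < ts[j]:
--             i += 1
--         elif ts[j] < qs[i]:
--             j += 1
--         else:
--             v = qs[i]
--             ci = 0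
--             while i < len(qs) and qs[i] == v:
--                 ci += 1
--                 i += 1
--             cj = 0
--             while j < len(ts) and ts[j] == v:
--                 cj += 1
--                 j += 1
--             score += ci * cj
--     return score
-- ===== Notes on version B (the rewrite author's own statement) =====
-- stated objective: alternative
-- what changed: B replaces A's hash-counter over text summed per query token with a sort-then-merge: both token lists are sorted and a two-pointer merge multiplies the lengths of equal runs (ci*cj per common token), which equals sum_q count_text(q).
import Mathlib
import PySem

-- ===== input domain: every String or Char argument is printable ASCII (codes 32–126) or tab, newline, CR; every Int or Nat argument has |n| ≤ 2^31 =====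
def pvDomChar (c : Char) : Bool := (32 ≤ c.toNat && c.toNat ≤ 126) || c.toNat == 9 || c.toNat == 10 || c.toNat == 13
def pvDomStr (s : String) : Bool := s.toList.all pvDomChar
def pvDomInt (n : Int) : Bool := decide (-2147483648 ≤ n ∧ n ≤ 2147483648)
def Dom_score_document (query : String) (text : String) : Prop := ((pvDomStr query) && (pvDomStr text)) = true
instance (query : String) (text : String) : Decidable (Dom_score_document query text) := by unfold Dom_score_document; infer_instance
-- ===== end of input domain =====

-- B sorts both token lists and scores by a two-pointer merge multiplying equal-run lengths
-- (alternative algorithm: sort-merge instead of hash counting; same result, not faster).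

-- string.punctuation
def pvPunct : String := "!\"#$%&'()*+,-./:;<=>?@[\\]^_`{|}~"

-- ===== PORT A =====
def score_document (query : String) (text : String) : Int :=
  let query_tokens := (PySem.Str.split₀ (PySem.Str.lower query)).foldl
      (fun acc raw =>
        let token := PySem.Str.stripChars raw pvPunct
        if token != "" then acc ++ [token] else acc) []
  if query_tokens = [] then 0
  else
    let token_counts := (PySem.Str.split₀ (PySem.Str.lower text)).foldl
        (fun d raw =>
          let token := PySem.Str.stripChars raw pvPunct
          if token != "" then d.insert token (d.getD token 0 + 1) else d)
        PySem.Dict.empty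
    query_tokens.foldl (fun score token => score + token_counts.getD token 0) 0

-- ===== PORT B =====
def pvTokens (s : String) : List String :=
  ((PySem.Str.split₀ (PySem.Str.lower s)).map
      (fun raw => PySem.Str.stripChars raw pvPunct)).filter (· != "")

-- the two-pointer merge loop of Source B: heads replace the indices i, j;
-- the two inner run-counting whiles are the takeWhile lengths, advancing both pointers is dropWhile
def pvMergeScore : List String → List String → Int
  | [], _ => 0
  | _ :: _, [] => 0
  | q :: Q, t :: T =>
    if q < t then pvMergeScore Q (t :: T)
    else if t < q then pvMergeScore (q :: Q) T
    else
      ((1 + (Q.takeWhile (· == q)).length : Nat) : Int) *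
        ((1 + (T.takeWhile (· == q)).length : Nat) : Int)
        + pvMergeScore (Q.dropWhile (· == q)) (T.dropWhile (· == q))
termination_by Q T => Q.length + T.length
decreasing_by
  all_goals
    have h1 := List.length_dropWhile_le (p := (· == q)) (l := Q)
    have h2 := List.length_dropWhile_le (p := (· == q)) (l := T)
    simp at h1 h2 ⊢ <;> omega

def score_document_alt (query : String) (text : String) : Int :=
  pvMergeScore (PySem.List.sorted (pvTokens query) (fun x => x) false)
               (PySem.List.sorted (pvTokens text) (fun x => x) false)

-- ===== PRECONDITION & SPEC =====
def Spec_score_document (query : String) (text : String) (out : Int) : Prop := out = score_document_alt query text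
instance (query : String) (text : String) (out : Int) : Decidable (Spec_score_document query text out) := by unfold Spec_score_document; infer_instance

-- ===== CLAIM (what is proved, stated in full; the proofs are below) =====
def Claim_equal_score_document : Prop := ∀ (query : String) (text : String), Dom_score_document query text → Spec_score_document query text (score_document query text)

-- ===== LEMMAS AND PROOFS =====

-- A's skip-empty loops over the raw words are folds over the filtered stripped-token list.
theorem pv_foldl_strip {γ : Type} (g : γ → String → γ) (l : List String) (init : γ) :
    l.foldl (fun acc raw =>
        if PySem.Str.stripChars raw pvPunct != "" then g acc (PySem.Str.stripChars raw pvPunct)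
        else acc) init
      = ((l.map (fun raw => PySem.Str.stripChars raw pvPunct)).filter (· != "")).foldl g init := by
  induction l generalizing init with
  | nil => rfl
  | cons a l ih =>
      simp only [List.foldl_cons, List.map_cons, List.filter_cons]
      cases hb : PySem.Str.stripChars a pvPunct != ""
      · simp only [Bool.false_eq_true, if_false, ih]
      · simp only [if_true, List.foldl_cons, ih]

-- every element a sorted list's dropWhile (== q) leaves is strictly above q (q below the whole list)
theorem pv_dropWhile_gt (q : String) (l : List String) (hl : l.Pairwise (· ≤ ·))
    (hq : ∀ y ∈ l, q ≤ y) : ∀ x ∈ l.dropWhile (· == q), q < x := by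
  induction l with
  | nil => simp
  | cons a l ih =>
      have ha : q ≤ a := hq a (by simp)
      by_cases h : a = q
      · subst h
        simp only [List.dropWhile_cons, beq_self_eq_true, if_true]
        exact ih (List.pairwise_cons.mp hl).2 (fun y hy => hq y (by simp [hy]))
      · have hqa : q < a := lt_of_le_of_ne ha (fun e => h e.symm)
        simp only [List.dropWhile_cons, beq_iff_eq, h, if_false]
        intro x hx
        rcases List.mem_cons.mp hx with rfl | hx
        · exact hqa
        · exact lt_of_lt_of_le hqa ((List.pairwise_cons.mp hl).1 x hx)

-- the sorted merge computes Σ_{q∈Q} count_T q, for ≤-sorted Q and T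
theorem pv_merge_eq : ∀ (n : Nat) (Q T : List String), Q.length + T.length ≤ n →
    Q.Pairwise (· ≤ ·) → T.Pairwise (· ≤ ·) →
    pvMergeScore Q T = (Q.map (fun q => ((T.count q : Nat) : Int))).sum := by
  intro n
  induction n with
  | zero =>
      intro Q T h _ _
      have hQ : Q = [] := by cases Q <;> simp_all
      subst hQ; simp [pvMergeScore]
  | succ n ih =>
      intro Q T hlen hQ hT
      match Q, T with
      | [], T => simp [pvMergeScore]
      | q :: Q, [] => simp [pvMergeScore]
      | q :: Q, t :: T =>
        have hQtail := (List.pairwise_cons.mp hQ).2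
        have hQhead := (List.pairwise_cons.mp hQ).1
        have hTtail := (List.pairwise_cons.mp hT).2
        have hThead := (List.pairwise_cons.mp hT).1
        simp only [List.length_cons] at hlen
        by_cases h1 : q < t
        · -- advance the query pointer: q occurs nowhere in t :: T
          have hcnt : (t :: T).count q = 0 := by
            rw [List.count_eq_zero]
            intro hmem
            rcases List.mem_cons.mp hmem with rfl | hmem
            · exact lt_irrefl q h1
            · exact absurd (lt_of_lt_of_le h1 (hThead q hmem)) (lt_irrefl q)
          rw [show pvMergeScore (q :: Q) (t :: T) = pvMergeScore Q (t :: T) by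
                simp [pvMergeScore, h1]]
          rw [ih Q (t :: T) (by simp; omega) hQtail hT]
          simp [hcnt]
        · by_cases h2 : t < q
          · -- advance the text pointer: t matches no query token
            rw [show pvMergeScore (q :: Q) (t :: T) = pvMergeScore (q :: Q) T by
                  simp [pvMergeScore, h1, h2]]
            rw [ih (q :: Q) T (by simp; omega) hQ hTtail]
            apply congrArg List.sum
            apply List.map_congr_left
            intro x hx
            have hqx : q ≤ x := by
              rcases List.mem_cons.mp hx with rfl | hx
              · exact le_rfl
              · exact hQhead x hx
            have hxt : x ≠ t := fun e => absurd (lt_of_lt_of_le h2 (e ▸ hqx)) (lt_irrefl t)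
            simp [Ne.symm hxt]
          · -- equal heads: runs of q in both lists
            have hqt : q = t := le_antisymm (le_of_not_gt h2) (le_of_not_gt h1)
            subst hqt
            set a := Q.takeWhile (· == q) with ha
            set Q2 := Q.dropWhile (· == q) with hQ2
            set b := T.takeWhile (· == q) with hb
            set T2 := T.dropWhile (· == q) with hT2
            have hQsplit : a ++ Q2 = Q := List.takeWhile_append_dropWhile
            have hTsplit : b ++ T2 = T := List.takeWhile_append_dropWhile
            have haq : ∀ x ∈ a, q = x := by
              intro x hx
              rw [ha] at hx
              have hpx : (x == q) = true := List.mem_takeWhile_imp (p := fun y => y == q) hx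
              exact (beq_iff_eq.mp hpx).symm
            have hbq : ∀ x ∈ b, q = x := by
              intro x hx
              rw [hb] at hx
              have hpx : (x == q) = true := List.mem_takeWhile_imp (p := fun y => y == q) hx
              exact (beq_iff_eq.mp hpx).symm
            have hQ2gt : ∀ x ∈ Q2, q < x := pv_dropWhile_gt q Q hQtail hQhead
            have hT2gt : ∀ x ∈ T2, q < x := pv_dropWhile_gt q T hTtail hThead
            have hcb : b.count q = b.length := List.count_eq_length.mpr hbq
            have hcT2 : T2.count q = 0 := by
              rw [List.count_eq_zero]; intro hm; exact absurd (hT2gt q hm) (lt_irrefl q)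
            have hcT : T.count q = b.length := by
              rw [← hTsplit, List.count_append, hcb, hcT2]
              omega
            have LHS : pvMergeScore (q :: Q) (q :: T)
                = ((1 + a.length : Nat) : Int) * ((1 + b.length : Nat) : Int)
                    + pvMergeScore Q2 T2 := by
              simp [pvMergeScore, ← ha, ← hb, ← hQ2, ← hT2]
            rw [LHS]
            -- tail ih on the residues
            have hQ2len : Q2.length ≤ Q.length := by
              rw [hQ2]; exact List.length_dropWhile_le _ _
            have hT2len : T2.length ≤ T.length := by
              rw [hT2]; exact List.length_dropWhile_le _ _
            have hQ2p : Q2.Pairwise (· ≤ ·) := hQtail.sublist (by rw [hQ2]; exact List.dropWhile_sublist _)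
            have hT2p : T2.Pairwise (· ≤ ·) := hTtail.sublist (by rw [hT2]; exact List.dropWhile_sublist _)
            rw [ih Q2 T2 (by omega) hQ2p hT2p]
            -- now compute the right-hand side over q :: (a ++ Q2)
            have hmapQ2 : Q2.map (fun x => (((q :: T).count x : Nat) : Int))
                = Q2.map (fun x => ((T2.count x : Nat) : Int)) := by
              apply List.map_congr_left
              intro x hx
              have hqx : q < x := hQ2gt x hx
              have hxq : x ≠ q := fun e => absurd (e ▸ hqx) (lt_irrefl q)
              have hcbx : b.count x = 0 := by
                rw [List.count_eq_zero]; intro hm; exact hxq ((hbq x hm)).symm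
              rw [List.count_cons, ← hTsplit, List.count_append, hcbx]
              simp [Ne.symm hxq]
            have hmapa : a.map (fun x => (((q :: T).count x : Nat) : Int))
                = a.map (fun _ => ((1 + b.length : Nat) : Int)) := by
              apply List.map_congr_left
              intro x hx
              have : x = q := (haq x hx).symm
              subst this
              rw [List.count_cons, hcT]
              simp [Nat.add_comm]
            have hsuma : (a.map (fun _ => ((1 + b.length : Nat) : Int))).sum
                = (a.length : Int) * ((1 + b.length : Nat) : Int) := by
              simp
            rw [show (q :: Q) = q :: (a ++ Q2) by rw [hQsplit]]
            simp only [List.map_cons, List.map_append, List.sum_cons, List.sum_append,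
              hmapQ2, hmapa, hsuma]
            rw [List.count_cons, hcT]
            simp only [beq_self_eq_true, if_true]
            push_cast
            ring

-- B = Σ_{q∈Q} count_T q on the unsorted token lists
theorem pv_sorted_merge (Q T : List String) :
    pvMergeScore (PySem.List.sorted Q (fun x => x) false) (PySem.List.sorted T (fun x => x) false)
      = (Q.map (fun q => ((T.count q : Nat) : Int))).sum := by
  have hQ := PySem.List.sorted_perm (xs := Q) (key := fun x : String => x) (rev := false)
  have hT := PySem.List.sorted_perm (xs := T) (key := fun x : String => x) (rev := false)
  rw [pv_merge_eq ((PySem.List.sorted Q (fun x => x) false).length + (PySem.List.sorted T (fun x => x) false).length)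
      _ _ le_rfl
      (by simpa using PySem.List.sorted_pairwise Q (fun x => x))
      (by simpa using PySem.List.sorted_pairwise T (fun x => x))]
  have hcnt : ∀ q : String, ((PySem.List.sorted T (fun x => x) false).count q) = T.count q :=
    fun q => hT.count_eq q
  calc ((PySem.List.sorted Q (fun x => x) false).map
          (fun q => (((PySem.List.sorted T (fun x => x) false).count q : Nat) : Int))).sum
      = ((PySem.List.sorted Q (fun x => x) false).map (fun q => ((T.count q : Nat) : Int))).sum := by
        simp only [hcnt]
    _ = (Q.map (fun q => ((T.count q : Nat) : Int))).sum := (hQ.map _).sum_eq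

-- A's early-return-plus-query-side sum equals the double count
theorem pv_main (Q T : List String) :
    (if Q = [] then 0 else Q.foldl (fun score token => score + (PySem.Dict.counter T).getD token 0) 0)
      = (Q.map (fun q => ((T.count q : Nat) : Int))).sum := by
  split
  · next h => subst h; simp
  · rw [PySem.List.foldl_add]
    simp only [PySem.Dict.getD_counter, zero_add]

-- ===== VERDICT (by name: the statement is the Claim_ definition above) =====
theorem score_document_spec : Claim_equal_score_document := by
  intro query text _
  unfold Spec_score_document score_document score_document_alt
  simp only [pvTokens]
  rw [pv_foldl_strip (fun acc t => acc ++ [t]),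
      pv_foldl_strip (fun (d : PySem.Dict String Int) t => d.insert t (d.getD t 0 + 1)),
      PySem.List.foldl_append_singleton, List.nil_append,
      PySem.Dict.foldl_insert_getD_add_one_eq_counter,
      pv_main, pv_sorted_merge]
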